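-- pv_equiv track=rewrite | github.com/Gavin0099/Ashfall | src/run_summary.py | infer_route_family
-- ===== SOURCE A (Python) =====
-- def infer_route_family(route: list[str]) -> str:
--     has_north = any("north" in node for node in route)
--     has_south = any("south" in node for node in route)
--     if has_north and has_south:
--         return "mixed"
--     if has_north:
--         return "north"
--     if has_south:
--         return "south"
--     return "unknown"
-- ===== SOURCE B (Python) =====
-- def infer_route_family(route: list[str]) -> str:
--     code = 0
--     for node in route:
--         code |= 2 * ("north" in node) + ("south" in node)
--     return ["unknown", "south", "north", "mixed"][code]
-- ===== Notes on version B (the rewrite author's own statement) =====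
-- stated objective: alternative
-- what changed: Encodes each node's north/south hits as a 2-bit mask, OR-reduces the masks by structural recursion, and returns the answer by indexing a 4-entry table, replacing A's two any() scans and four-way branch cascade.
import Mathlib
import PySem

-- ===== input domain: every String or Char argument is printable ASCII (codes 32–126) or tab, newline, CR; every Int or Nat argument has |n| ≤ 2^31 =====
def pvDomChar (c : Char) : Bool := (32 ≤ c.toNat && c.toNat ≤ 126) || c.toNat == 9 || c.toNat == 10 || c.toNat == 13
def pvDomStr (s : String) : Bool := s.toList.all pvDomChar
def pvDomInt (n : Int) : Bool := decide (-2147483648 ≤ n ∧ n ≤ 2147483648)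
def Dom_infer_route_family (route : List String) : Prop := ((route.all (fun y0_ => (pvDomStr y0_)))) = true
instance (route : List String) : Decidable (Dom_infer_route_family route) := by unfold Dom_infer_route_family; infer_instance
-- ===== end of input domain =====

-- B replaces the two any() scans and branch cascade by a recursive 2-bit-mask OR-reduction with a table lookup (objective: alternative).

-- ===== PORT A =====
def infer_route_family (route : List String) : String :=
  let has_north := route.any (fun node => PySem.Str.isIn "north" node)
  let has_south := route.any (fun node => PySem.Str.isIn "south" node)
  if has_north && has_south then "mixed"
  else if has_north then "north"
  else if has_south then "south"
  else "unknown"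

-- ===== PORT B =====
-- 2-bit mask OR-fold: bit 1 = north seen, bit 0 = south seen
def routeMask (route : List String) : Nat :=
  route.foldl (fun code node =>
    code ||| (2 * (if PySem.Str.isIn "north" node then 1 else 0)
                + (if PySem.Str.isIn "south" node then 1 else 0))) 0

def infer_route_family_alt (route : List String) : String :=
  (["unknown", "south", "north", "mixed"]).getD (routeMask route) ""

-- ===== PRECONDITION & SPEC =====
def Spec_infer_route_family (route : List String) (out : String) : Prop := out = infer_route_family_alt route
instance (route : List String) (out : String) : Decidable (Spec_infer_route_family route out) := by unfold Spec_infer_route_family; infer_instance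

-- ===== CLAIM (what is proved, stated in full; the proofs are below) =====
def Claim_equal_infer_route_family : Prop := ∀ (route : List String), Dom_infer_route_family route → Spec_infer_route_family route (infer_route_family route)

-- ===== LEMMAS AND PROOFS =====
lemma pvBitOr : ∀ (a b c d : Bool),
    ((2 * (if a then 1 else 0) + (if b then 1 else 0)) |||
      (2 * (if c then 1 else 0) + (if d then 1 else 0)) : Nat)
      = 2 * (if a || c then 1 else 0) + (if b || d then 1 else 0) := by decide

lemma routeMask_foldl (l : List String) (c : Nat) :
    l.foldl (fun code node =>
      code ||| (2 * (if PySem.Str.isIn "north" node then 1 else 0)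
                  + (if PySem.Str.isIn "south" node then 1 else 0))) c =
      c ||| (2 * (if l.any (fun n => PySem.Str.isIn "north" n) then 1 else 0)
               + (if l.any (fun n => PySem.Str.isIn "south" n) then 1 else 0)) := by
  induction l generalizing c with
  | nil => simp
  | cons node rest ih =>
    simp only [List.foldl_cons, List.any_cons, ih]
    rw [Nat.or_assoc, pvBitOr]
    rfl

lemma routeMask_eq (l : List String) :
    routeMask l =
      2 * (if l.any (fun n => PySem.Str.isIn "north" n) then 1 else 0)
        + (if l.any (fun n => PySem.Str.isIn "south" n) then 1 else 0) := by
  unfold routeMask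
  rw [routeMask_foldl]
  exact Nat.zero_or _

-- ===== VERDICT (by name: the statement is the Claim_ definition above) =====
theorem infer_route_family_spec : Claim_equal_infer_route_family := by
  intro route _
  unfold Spec_infer_route_family infer_route_family infer_route_family_alt
  rw [routeMask_eq]
  cases h1 : route.any (fun n => PySem.Str.isIn "north" n) <;>
    cases h2 : route.any (fun n => PySem.Str.isIn "south" n) <;> simp
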